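-- pv_equiv track=rewrite | github.com/JaysonBrenton/MRE | ingestion/connectors/liverc/parsers/entry_list_nav_clusters.py | cluster_sorted_tab_ids
-- ===== SOURCE A (Python) =====
-- from typing import Dict, List, Optional, Set, Tuple, TypeVar
--
-- MAX_NAV_TAB_ID_GAP = 500
--
-- def cluster_sorted_tab_ids(sorted_ids: List[int], max_gap: int = MAX_NAV_TAB_ID_GAP) -> List[List[int]]:
--     """Split sorted distinct tab IDs into clusters when there is a large gap (new LiveRC batch)."""
--     if not sorted_ids:
--         return []
--     clusters: List[List[int]] = [[sorted_ids[0]]]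
--     for x in sorted_ids[1:]:
--         if x - clusters[-1][-1] <= max_gap:
--             clusters[-1].append(x)
--         else:
--             clusters.append([x])
--     return clusters
-- ===== SOURCE B (Python) =====
-- MAX_NAV_TAB_ID_GAP = 500
--
-- def cluster_sorted_tab_ids(sorted_ids, max_gap=MAX_NAV_TAB_ID_GAP):
--     """Two-phase: find the cut indices (large gaps), then slice between consecutive boundaries."""
--     if not sorted_ids:
--         return []
--     n = len(sorted_ids)
--     cuts = [i for i, (a, b) in enumerate(zip(sorted_ids, sorted_ids[1:]), 1) if b - a > max_gap]
--     bounds = [0] + cuts + [n]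
--     return [sorted_ids[a:b] for a, b in zip(bounds, bounds[1:])]
-- ===== Notes on version B (the rewrite author's own statement) =====
-- stated objective: alternative
-- what changed: Replaces A's incremental append-to-last-cluster loop with a two-phase decomposition: first compute the list of cut indices where adjacent ids differ by more than max_gap, then partition the list by slicing between consecutive boundaries.
import Mathlib
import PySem

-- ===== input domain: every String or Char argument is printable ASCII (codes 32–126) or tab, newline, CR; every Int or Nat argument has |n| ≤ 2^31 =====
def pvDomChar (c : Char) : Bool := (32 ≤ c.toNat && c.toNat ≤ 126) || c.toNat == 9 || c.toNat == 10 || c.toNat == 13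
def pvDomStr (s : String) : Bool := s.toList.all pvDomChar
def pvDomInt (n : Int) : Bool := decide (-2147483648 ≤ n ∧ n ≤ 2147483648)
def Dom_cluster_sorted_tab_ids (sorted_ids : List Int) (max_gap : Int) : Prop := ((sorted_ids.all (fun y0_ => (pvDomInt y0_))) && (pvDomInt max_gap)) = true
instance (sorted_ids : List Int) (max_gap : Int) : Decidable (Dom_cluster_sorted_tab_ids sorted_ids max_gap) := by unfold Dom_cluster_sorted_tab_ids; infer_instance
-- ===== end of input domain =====

-- B replaces A's incremental append-to-last-cluster loop by a two-phase cut-indices-then-slice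
-- decomposition (alternative decomposition, same cost).

-- ===== PORT A =====
-- loop body: append x to clusters[-1] or start a new cluster
def clusterStepA (max_gap : Int) (clusters : List (List Int)) (x : Int) : List (List Int) :=
  match PySem.List.pyGet? clusters (-1) with
  | none => clusters  -- unreachable: clusters is nonempty throughout
  | some last =>
    match PySem.List.pyGet? last (-1) with
    | none => clusters  -- unreachable: every cluster is nonempty
    | some l =>
      if x - l ≤ max_gap then clusters.dropLast ++ [last ++ [x]]
      else clusters ++ [[x]]

def cluster_sorted_tab_ids (sorted_ids : List Int) (max_gap : Int) : List (List Int) :=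
  match sorted_ids with
  | [] => []
  | h :: _ =>
    (PySem.List.slice sorted_ids (some 1) none).foldl (clusterStepA max_gap) [[h]]

-- ===== PORT B =====
def cluster_sorted_tab_ids_alt (sorted_ids : List Int) (max_gap : Int) : List (List Int) :=
  if sorted_ids = [] then []
  else
    let n : Int := sorted_ids.length
    let cuts : List Int :=
      (PySem.List.enumerate (sorted_ids.zip (PySem.List.slice sorted_ids (some 1) none)) 1).filterMap
        (fun p => if p.2.2 - p.2.1 > max_gap then some p.1 else none)
    let bounds : List Int := 0 :: (cuts ++ [n])
    (bounds.zip bounds.tail).map (fun ab => PySem.List.slice sorted_ids (some ab.1) (some ab.2))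

-- ===== PRECONDITION & SPEC =====
def Spec_cluster_sorted_tab_ids (sorted_ids : List Int) (max_gap : Int) (out : List (List Int)) : Prop := out = cluster_sorted_tab_ids_alt sorted_ids max_gap
instance (sorted_ids : List Int) (max_gap : Int) (out : List (List Int)) : Decidable (Spec_cluster_sorted_tab_ids sorted_ids max_gap out) := by unfold Spec_cluster_sorted_tab_ids; infer_instance

-- ===== CLAIM (what is proved, stated in full; the proofs are below) =====
def Claim_equal_cluster_sorted_tab_ids : Prop := ∀ (sorted_ids : List Int) (max_gap : Int), Dom_cluster_sorted_tab_ids sorted_ids max_gap → Spec_cluster_sorted_tab_ids sorted_ids max_gap (cluster_sorted_tab_ids sorted_ids max_gap)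

-- ===== LEMMAS AND PROOFS =====

-- common reference: the natural recursive chunker
def pvChunk (g : Int) (h : Int) : List Int → List (List Int)
  | [] => [[h]]
  | x :: xs =>
    if x - h ≤ g then
      match pvChunk g x xs with
      | [] => [[h]]  -- unreachable
      | c :: cs => (h :: c) :: cs
    else [h] :: pvChunk g x xs

theorem pvChunk_ne_nil (g h : Int) (t : List Int) : pvChunk g h t ≠ [] := by
  cases t with
  | nil => simp [pvChunk]
  | cons x xs =>
    simp only [pvChunk]
    split_ifs
    · cases pvChunk g x xs <;> simp
    · simp

-- A's fold equals pvChunk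
theorem foldA_chunk (g : Int) (t : List Int) : ∀ (C : List (List Int)) (cur : List Int) (h : Int),
    t.foldl (clusterStepA g) (C ++ [cur ++ [h]]) = C ++ (pvChunk g h t).modifyHead (cur ++ ·) := by
  induction t with
  | nil => intro C cur h; simp [pvChunk]
  | cons x xs ih =>
    intro C cur h
    have hstep : clusterStepA g (C ++ [cur ++ [h]]) x =
        if x - h ≤ g then C ++ [(cur ++ [h]) ++ [x]] else (C ++ [cur ++ [h]]) ++ [[x]] := by
      simp [clusterStepA, PySem.List.pyGet?_neg_one_append_singleton]
    simp only [List.foldl_cons, hstep]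
    by_cases hc : x - h ≤ g
    · simp only [if_pos hc]
      have := ih C (cur ++ [h]) x
      rw [show (cur ++ [h]) ++ [x] = (cur ++ [h]) ++ [x] from rfl] at this
      rw [this]
      simp only [pvChunk, if_pos hc]
      rcases hh : pvChunk g x xs with _ | ⟨c, cs⟩
      · exact absurd hh (pvChunk_ne_nil g x xs)
      · simp [List.modifyHead]
    · simp only [if_neg hc]
      have := ih (C ++ [cur ++ [h]]) [] x
      simp only [List.nil_append] at this
      rw [this]
      simp only [pvChunk, if_neg hc]
      rcases hh : pvChunk g x xs with _ | ⟨c, cs⟩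
      · exact absurd hh (pvChunk_ne_nil g x xs)
      · simp [List.modifyHead]

theorem A_eq_chunk (g h : Int) (t : List Int) :
    cluster_sorted_tab_ids (h :: t) g = pvChunk g h t := by
  have := foldA_chunk g t [] [] h
  simp only [List.nil_append] at this
  simp only [cluster_sorted_tab_ids, PySem.List.slice_from_one, List.tail_cons]
  rw [this]
  cases hh : pvChunk g h t <;> simp [List.modifyHead]

-- B-side helpers (proof only)
def pvCuts (g : Int) (ps : List (Int × Int)) (s : Int) : List Int :=
  (PySem.List.enumerate ps s).filterMap (fun p => if p.2.2 - p.2.1 > g then some p.1 else none)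

def pvSlices (l : List Int) (bounds : List Int) : List (List Int) :=
  (bounds.zip bounds.tail).map (fun ab => PySem.List.slice l (some ab.1) (some ab.2))

theorem pvCuts_cons (g : Int) (a b : Int) (ps : List (Int × Int)) (s : Int) :
    pvCuts g ((a, b) :: ps) s = (if b - a > g then [s] else []) ++ pvCuts g ps (s + 1) := by
  simp only [pvCuts, PySem.List.enumerate_cons, List.filterMap_cons]
  split_ifs <;> simp

theorem pvCuts_shift (g : Int) (ps : List (Int × Int)) : ∀ s : Int,
    pvCuts g ps (s + 1) = (pvCuts g ps s).map (· + 1) := by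
  induction ps with
  | nil => intro s; simp [pvCuts, PySem.List.enumerate_nil]
  | cons p ps ih =>
    intro s
    obtain ⟨a, b⟩ := p
    rw [pvCuts_cons, pvCuts_cons, ih (s + 1), List.map_append]
    split_ifs <;> simp

theorem pvCuts_nonneg (g : Int) (ps : List (Int × Int)) : ∀ (s e : Int), e ∈ pvCuts g ps s → s ≤ e := by
  induction ps with
  | nil => intro s e he; simp [pvCuts, PySem.List.enumerate_nil] at he
  | cons p ps ih =>
    intro s e he
    obtain ⟨a, b⟩ := p
    rw [pvCuts_cons] at he
    rcases List.mem_append.1 he with h1 | h2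
    · split_ifs at h1 <;> simp_all
    · have := ih (s + 1) e h2; omega

theorem slice_cons_succ (x : Int) (rest : List Int) (a b : Int) (ha : 0 ≤ a) (hb : 0 ≤ b) :
    PySem.List.slice (x :: rest) (some (a + 1)) (some (b + 1)) =
    PySem.List.slice rest (some a) (some b) := by
  rw [PySem.List.slice_toNat _ (by omega) (by omega), PySem.List.slice_toNat _ ha hb]
  have h1 : (a + 1).toNat = a.toNat + 1 := by omega
  have h2 : (b + 1).toNat = b.toNat + 1 := by omega
  simp [h1, h2]

theorem slice_zero_cons_succ (x : Int) (rest : List Int) (b : Int) (hb : 0 ≤ b) :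
    PySem.List.slice (x :: rest) (some 0) (some (b + 1)) =
    x :: PySem.List.slice rest (some 0) (some b) := by
  rw [PySem.List.slice_toNat _ (by omega) (by omega), PySem.List.slice_toNat _ le_rfl hb]
  have h2 : (b + 1).toNat = b.toNat + 1 := by omega
  simp [h2]

theorem pvSlices_shift (x : Int) (rest : List Int) (B : List Int)
    (hB : ∀ e ∈ B, 0 ≤ e) :
    pvSlices (x :: rest) (B.map (· + 1)) = pvSlices rest B := by
  induction B with
  | nil => simp [pvSlices]
  | cons b0 B ih =>
    cases B with
    | nil => simp [pvSlices]
    | cons b1 B' =>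
      simp only [pvSlices, List.map_cons, List.tail_cons, List.zip_cons_cons] at *
      rw [slice_cons_succ x rest b0 b1 (hB b0 (by simp)) (hB b1 (by simp)),
        ih (fun e he => hB e (by simp_all))]

theorem pvSlices_cons (l : List Int) (c0 c1 : Int) (rest : List Int) :
    pvSlices l (c0 :: c1 :: rest) = PySem.List.slice l (some c0) (some c1) :: pvSlices l (c1 :: rest) := by
  simp [pvSlices]

theorem B_main (g : Int) (xs : List Int) : ∀ (x : Int),
    pvSlices (x :: xs) (0 :: (pvCuts g ((x :: xs).zip xs) 1 ++ [((x :: xs).length : Int)])) =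
    pvChunk g x xs := by
  induction xs with
  | nil =>
    intro x
    simp only [List.zip_nil_right, pvCuts, PySem.List.enumerate_nil, List.filterMap_nil,
      List.nil_append, List.length_cons, List.length_nil]
    rw [pvSlices]
    simp only [List.tail_cons, List.zip_cons_cons, List.zip_nil_right, List.map_cons, List.map_nil]
    rw [PySem.List.slice_toNat _ le_rfl (by omega)]
    simp [pvChunk]
  | cons y ys ih =>
    intro x
    have hzip : (x :: y :: ys).zip (y :: ys) = (x, y) :: (y :: ys).zip ys := by simp
    rw [hzip, pvCuts_cons, pvCuts_shift]
    set cuts' := pvCuts g ((y :: ys).zip ys) 1 with hcuts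
    have hn : ((x :: y :: ys).length : Int) = ((y :: ys).length : Int) + 1 := by simp
    have hBnn : ∀ e ∈ cuts' ++ [((y :: ys).length : Int)], 0 ≤ e := by
      intro e he
      rcases List.mem_append.1 he with h1 | h2
      · have := pvCuts_nonneg g _ 1 e h1; omega
      · simp at h2; omega
    by_cases hc : y - x > g
    · -- a cut at index 1: the first cluster is [x]
      simp only [if_pos hc, List.cons_append, List.nil_append]
      rw [pvSlices_cons]
      have hmap : (1 : Int) :: (cuts'.map (· + 1) ++ [((x :: y :: ys).length : Int)]) =
          ((0 : Int) :: (cuts' ++ [((y :: ys).length : Int)])).map (· + 1) := by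
        simp
      rw [hmap, pvSlices_shift x (y :: ys) _ (by
        intro e he
        rcases List.mem_cons.1 he with h1 | h2
        · omega
        · exact hBnn e h2)]
      rw [ih y]
      have hsl : PySem.List.slice (x :: y :: ys) (some 0) (some 1) = [x] := by
        rw [PySem.List.slice_toNat _ le_rfl (by omega)]; simp
      rw [hsl]
      simp only [pvChunk]
      rw [if_neg (by omega)]
    · -- no cut: x joins the first cluster
      simp only [if_neg hc, List.nil_append]
      obtain ⟨b0, B', hB⟩ : ∃ b0 B', cuts' ++ [((y :: ys).length : Int)] = b0 :: B' := by
        cases cuts' <;> exact ⟨_, _, rfl⟩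
      have hb0 : 0 ≤ b0 := hBnn b0 (by rw [hB]; simp)
      have hbounds : cuts'.map (· + 1) ++ [((x :: y :: ys).length : Int)] =
          (b0 + 1) :: B'.map (· + 1) := by
        have h1 : cuts'.map (· + 1) ++ [((x :: y :: ys).length : Int)] =
            (cuts' ++ [((y :: ys).length : Int)]).map (· + 1) := by
          simp
        rw [h1, hB]; simp
      rw [hbounds, pvSlices_cons]
      have h2 : pvSlices (x :: y :: ys) ((b0 + 1) :: B'.map (· + 1)) =
          pvSlices (y :: ys) (b0 :: B') := by
        have h3 : (b0 + 1) :: B'.map (· + 1) = (b0 :: B').map (· + 1) := by simp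
        rw [h3, pvSlices_shift x (y :: ys) _ (by rw [← hB]; exact hBnn)]
      rw [h2, slice_zero_cons_succ x (y :: ys) b0 hb0]
      have hIH := ih y
      rw [hB, pvSlices_cons] at hIH
      simp only [pvChunk]
      rw [if_pos (by omega), ← hIH]

-- ===== VERDICT (by name: the statement is the Claim_ definition above) =====
theorem cluster_sorted_tab_ids_spec : Claim_equal_cluster_sorted_tab_ids := by
  unfold Claim_equal_cluster_sorted_tab_ids
  intro sorted_ids max_gap _
  unfold Spec_cluster_sorted_tab_ids
  cases sorted_ids with
  | nil => simp [cluster_sorted_tab_ids, cluster_sorted_tab_ids_alt]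
  | cons h t =>
    rw [A_eq_chunk]
    rw [show cluster_sorted_tab_ids_alt (h :: t) max_gap =
        pvSlices (h :: t) (0 :: (pvCuts max_gap ((h :: t).zip t) 1 ++ [((h :: t).length : Int)])) from by
      simp only [cluster_sorted_tab_ids_alt, if_neg (List.cons_ne_nil h t),
        PySem.List.slice_from_one, List.tail_cons]
      rfl]
    exact (B_main max_gap t h).symm
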